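-- pv_equiv track=rewrite | github.com/cupidthatbtc/aoty_pred_pub | src/aoty_pred/visualization/introspection/diagram_builder.py | _parse_cluster_name
-- ===== SOURCE A (Python) =====
-- SECTION_HIERARCHY: dict[str, list[str]] = {
--     "CONFIG": [],  # Flat - all config nodes together
--     "DATA_RAW": ["raw_csv"],  # Input data sources
--     "DATA_CLEAN": ["schema", "cleaning"],  # Validation + cleaning
--     "DATA_SPLIT": ["strategy", "partitions"],  # Split logic + train/val/test
--     "FEATURES": ["blocks"],  # Feature engineering blocks
--     "PRIORS": [
--         "artist_pooling",
--         "career_dynamics",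
--         "fixed_effects",
--         "observation_noise",
--         "heteroscedastic",
--     ],  # 5 prior groups
--     "MODEL": [
--         "hyperprior",
--         "random_effect",
--         "fixed_effect",
--         "likelihood",
--         "sampling",
--         "adaptation",
--     ],  # Model architecture + MCMC
--     "CONVERGENCE": ["diagnostics"],  # R-hat, ESS, divergences
--     "EVALUATION": ["metrics", "calibration"],  # LOO-CV, CRPS, coverage
--     "OUTPUT": ["pipeline"],  # Results + model files
-- }
--
-- def _parse_cluster_name(cluster_name: str) -> tuple[str, str | None]:
--     """Parse a cluster name into section and sub-cluster.
--
--     Handles sections with underscores (e.g., DATA_CLEAN) by matching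
--     against known section names in SECTION_HIERARCHY.
--
--     Args:
--         cluster_name: Hierarchical cluster name (e.g., "DATA_CLEAN_cleaning").
--
--     Returns:
--         Tuple of (section, sub_cluster) where sub_cluster may be None.
--     """
--     # Check for exact section match (flat sections like CONFIG)
--     if cluster_name in SECTION_HIERARCHY:
--         return cluster_name, None
--
--     # Find matching section prefix
--     for section in SECTION_HIERARCHY:
--         prefix = section + "_"
--         if cluster_name.startswith(prefix):
--             sub_cluster = cluster_name[len(prefix) :]
--             return section, sub_cluster
--
--     # Fallback: simple split (shouldn't happen with proper remapping)
--     parts = cluster_name.split("_", 1)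
--     section = parts[0]
--     sub_cluster = parts[1] if len(parts) > 1 else None
--     return section, sub_cluster
-- ===== SOURCE B (Python) =====
-- SECTION_HIERARCHY: dict[str, list[str]] = {
--     "CONFIG": [],
--     "DATA_RAW": ["raw_csv"],
--     "DATA_CLEAN": ["schema", "cleaning"],
--     "DATA_SPLIT": ["strategy", "partitions"],
--     "FEATURES": ["blocks"],
--     "PRIORS": [
--         "artist_pooling",
--         "career_dynamics",
--         "fixed_effects",
--         "observation_noise",
--         "heteroscedastic",
--     ],
--     "MODEL": [
--         "hyperprior",
--         "random_effect",
--         "fixed_effect",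
--         "likelihood",
--         "sampling",
--         "adaptation",
--     ],
--     "CONVERGENCE": ["diagnostics"],
--     "EVALUATION": ["metrics", "calibration"],
--     "OUTPUT": ["pipeline"],
-- }
--
--
-- def _parse_cluster_name(cluster_name: str) -> tuple[str, str | None]:
--     """Parse a cluster name into section and sub-cluster.
--
--     Tokenizes on '_' and looks up each '_'-joined token prefix in
--     SECTION_HIERARCHY, instead of scanning every known section with
--     startswith.
--     """
--     tokens = cluster_name.split("_")
--     for k in range(1, len(tokens) + 1):
--         candidate = "_".join(tokens[:k])
--         if candidate in SECTION_HIERARCHY: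
--             if k == len(tokens):
--                 return candidate, None
--             return candidate, "_".join(tokens[k:])
--     # No known section: first token is the section, remainder (if any) the sub-cluster.
--     if len(tokens) > 1:
--         return tokens[0], "_".join(tokens[1:])
--     return tokens[0], None
-- ===== Notes on version B (the rewrite author's own statement) =====
-- stated objective: alternative
-- what changed: B tokenizes the name on underscores once and looks up each underscore-joined token prefix in SECTION_HIERARCHY (first hit wins, whole-string hit gives sub_cluster None), instead of A's scan over every known section with startswith plus a separate exact-match check and split-once fallback.
import Mathlib
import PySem

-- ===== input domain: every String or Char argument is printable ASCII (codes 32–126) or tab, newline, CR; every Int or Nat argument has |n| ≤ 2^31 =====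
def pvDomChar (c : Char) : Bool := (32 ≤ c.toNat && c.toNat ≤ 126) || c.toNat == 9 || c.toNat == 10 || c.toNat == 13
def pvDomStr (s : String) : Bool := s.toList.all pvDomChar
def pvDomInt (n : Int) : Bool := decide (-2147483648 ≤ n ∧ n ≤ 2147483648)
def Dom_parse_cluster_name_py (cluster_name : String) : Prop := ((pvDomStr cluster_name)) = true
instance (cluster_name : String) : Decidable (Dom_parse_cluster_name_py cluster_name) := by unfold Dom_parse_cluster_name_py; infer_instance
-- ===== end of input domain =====

-- ===== PORT A =====
-- B re-implements A's section lookup by tokenizing on '_' and looking up '_'-joined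
-- token prefixes in the hierarchy, instead of A's startswith scan over every section.
-- SECTION_HIERARCHY (module constant, shared context of both implementations)
def pvSections : PySem.Dict String (List String) := PySem.Dict.mk
  [("CONFIG", []),
   ("DATA_RAW", ["raw_csv"]),
   ("DATA_CLEAN", ["schema", "cleaning"]),
   ("DATA_SPLIT", ["strategy", "partitions"]),
   ("FEATURES", ["blocks"]),
   ("PRIORS", ["artist_pooling", "career_dynamics", "fixed_effects", "observation_noise", "heteroscedastic"]),
   ("MODEL", ["hyperprior", "random_effect", "fixed_effect", "likelihood", "sampling", "adaptation"]),
   ("CONVERGENCE", ["diagnostics"]),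
   ("EVALUATION", ["metrics", "calibration"]),
   ("OUTPUT", ["pipeline"])]

-- A's final fallback: parts = cluster_name.split("_", 1); (parts[0], parts[1] if len>1 else None)
def pvFallbackA (cl : String) : String × Option String :=
  match PySem.Str.splitMax? cl "_" 1 with
  | some (s0 :: s1 :: _) => (s0, some s1)
  | some [s0] => (s0, none)
  | _ => (cl, none)   -- unreachable: the separator "_" is nonempty

-- A's `for section in SECTION_HIERARCHY` loop; falls through to the fallback
def pvLoopA (cl : String) : List String → String × Option String
  | [] => pvFallbackA cl
  | sec :: rest =>
    if PySem.Str.startswith cl (sec ++ "_") then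
      (sec, some (PySem.Str.slice cl (some (PySem.Str.len (sec ++ "_"))) none))
    else pvLoopA cl rest

def parse_cluster_name_py (cluster_name : String) : String × Option String :=
  if (PySem.Dict.get? pvSections cluster_name).isSome then (cluster_name, none)
  else pvLoopA cluster_name (PySem.Dict.keys pvSections)

-- ===== PORT B =====
-- B's `for k in range(1, len(tokens)+1)` loop over '_'-joined token prefixes
def pvScanB (tokens : List String) (k : Nat) : Option (String × Option String) :=
  if k ≤ tokens.length then
    let cand := PySem.Str.join "_" (tokens.take k)
    if (PySem.Dict.get? pvSections cand).isSome then
      if k = tokens.length then some (cand, none)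
      else some (cand, some (PySem.Str.join "_" (tokens.drop k)))
    else pvScanB tokens (k + 1)
  else none
termination_by tokens.length + 1 - k
decreasing_by omega

def parse_cluster_name_py_alt (cluster_name : String) : String × Option String :=
  let tokens := (PySem.Str.split? cluster_name "_").getD []   -- cluster_name.split("_"); sep ≠ "" so never none
  match pvScanB tokens 1 with
  | some r => r
  | none =>
    match tokens with
    | [] => ("", none)          -- unreachable: split always yields at least one token
    | [t0] => (t0, none)
    | t0 :: rest => (t0, some (PySem.Str.join "_" rest))

-- ===== PRECONDITION & SPEC =====
def Spec_parse_cluster_name_py (cluster_name : String) (out : String × Option String) : Prop := out = parse_cluster_name_py_alt cluster_name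
instance (cluster_name : String) (out : String × Option String) : Decidable (Spec_parse_cluster_name_py cluster_name out) := by unfold Spec_parse_cluster_name_py; infer_instance

-- ===== CLAIM (what is proved, stated in full; the proofs are below) =====
def Claim_equal_parse_cluster_name_py : Prop := ∀ (cluster_name : String), Dom_parse_cluster_name_py cluster_name → Spec_parse_cluster_name_py cluster_name (parse_cluster_name_py cluster_name)

-- ===== LEMMAS AND PROOFS =====

-- Known section names, in SECTION_HIERARCHY order (proof-side view of the dict keys)
def pvKeys : List String :=
  ["CONFIG", "DATA_RAW", "DATA_CLEAN", "DATA_SPLIT", "FEATURES", "PRIORS",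
   "MODEL", "CONVERGENCE", "EVALUATION", "OUTPUT"]

def pvSp : List Char → List (List Char)
  | [] => [[]]
  | c :: r =>
    if c = '_' then [] :: pvSp r
    else
      match pvSp r with
      | [] => [[c]]
      | t :: ts => (c :: t) :: ts

theorem pvSp_ne_nil (l : List Char) : pvSp l ≠ [] := by
  induction l with
  | nil => simp [pvSp]
  | cons c r ih =>
    simp only [pvSp]
    split
    · simp
    · split
      · simp
      · simp

theorem join_pvSp (l : List Char) : PySem.Chars.join ['_'] (pvSp l) = l := by
  induction l with
  | nil => simp [pvSp, PySem.Chars.join, List.intercalate]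
  | cons c r ih =>
    simp only [pvSp]
    split
    · subst c
      cases hr : pvSp r with
      | nil => exact absurd hr (pvSp_ne_nil r)
      | cons t ts =>
        rw [PySem.Chars.join_cons_cons]
        rw [hr] at ih
        simpa using ih
    · cases hr : pvSp r with
      | nil => exact absurd hr (pvSp_ne_nil r)
      | cons t ts =>
        rw [hr] at ih
        cases ts with
        | nil => simpa [PySem.Chars.join, List.intercalate] using ih
        | cons q ts' =>
          rw [PySem.Chars.join_cons_cons] at ih ⊢
          simp at ih ⊢
          simpa using ih

theorem pvSp_inj {a b : List Char} (h : pvSp a = pvSp b) : a = b := by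
  have := join_pvSp a; rw [h, join_pvSp] at this; exact this.symm

theorem pvSp_append (a b : List Char) : pvSp (a ++ '_' :: b) = pvSp a ++ pvSp b := by
  induction a with
  | nil => simp [pvSp]
  | cons c a' ih =>
    by_cases hc : c = '_'
    · subst c; simp [pvSp, ih]
    · simp only [List.cons_append, pvSp, if_neg hc, ih]
      cases ha : pvSp a' with
      | nil => exact absurd ha (pvSp_ne_nil a')
      | cons t ts => simp

theorem pvSp_sep_free {l t : List Char} (ht : t ∈ pvSp l) : '_' ∉ t := by
  induction l generalizing t with
  | nil => simp [pvSp] at ht; simp [ht]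
  | cons c r ih =>
    simp only [pvSp] at ht
    split at ht
    · rcases List.mem_cons.mp ht with h | h
      · simp [h]
      · exact ih h
    · rename_i hc
      cases hr : pvSp r with
      | nil => exact absurd hr (pvSp_ne_nil r)
      | cons t0 ts =>
        rw [hr] at ht
        rcases List.mem_cons.mp ht with h | h
        · subst h
          intro hmem
          rcases List.mem_cons.mp hmem with h2 | h2
          · exact hc h2.symm
          · exact ih (show t0 ∈ pvSp r from hr ▸ List.mem_cons_self) h2
        · exact ih (show t ∈ pvSp r from hr ▸ List.mem_cons_of_mem _ h)

theorem pvSp_of_sep_free {t : List Char} (ht : '_' ∉ t) : pvSp t = [t] := by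
  induction t with
  | nil => simp [pvSp]
  | cons c r ih =>
    simp only [List.mem_cons, not_or] at ht
    have hc : ¬ (c = '_') := fun h => ht.1 h.symm
    simp [pvSp, hc, ih ht.2]

theorem join_append {p : List (List Char)} (hp : p ≠ []) (q : List Char) (r : List (List Char)) :
    PySem.Chars.join ['_'] (p ++ q :: r) = PySem.Chars.join ['_'] p ++ '_' :: PySem.Chars.join ['_'] (q :: r) := by
  induction p with
  | nil => simp at hp
  | cons a p' ih =>
    cases p' with
    | nil => simp [PySem.Chars.join, List.intercalate]
    | cons b p'' =>
      have ih' := ih (by simp)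
      simp only [List.cons_append] at ih' ⊢
      rw [PySem.Chars.join_cons_cons, ih', PySem.Chars.join_cons_cons]
      simp

theorem pvSp_join {ts : List (List Char)} (hne : ts ≠ []) (hfree : ∀ t ∈ ts, '_' ∉ t) :
    pvSp (PySem.Chars.join ['_'] ts) = ts := by
  induction ts with
  | nil => simp at hne
  | cons t ts' ih =>
    cases ts' with
    | nil =>
      simp only [PySem.Chars.join, List.intercalate]
      simpa using pvSp_of_sep_free (hfree t List.mem_cons_self)
    | cons q r =>
      rw [PySem.Chars.join_cons_cons]
      rw [List.append_assoc]
      simp only [List.singleton_append]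
      rw [pvSp_append, pvSp_of_sep_free (hfree t List.mem_cons_self),
        ih (by simp) (fun u hu => hfree u (List.mem_cons_of_mem _ hu))]
      simp

theorem prefix_iff (w l : List Char) :
    ((w ++ ['_']) <+: l) ↔ ∃ ts, pvSp l = pvSp w ++ ts ∧ ts ≠ [] := by
  constructor
  · rintro ⟨r, hr⟩
    refine ⟨pvSp r, ?_, pvSp_ne_nil r⟩
    rw [← hr, List.append_assoc, List.singleton_append, pvSp_append]
  · rintro ⟨ts, hts, hne⟩
    cases ts with
    | nil => simp at hne
    | cons q r =>
      refine ⟨PySem.Chars.join ['_'] (q :: r), ?_⟩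
      have : PySem.Chars.join ['_'] (pvSp l) = l := join_pvSp l
      rw [hts, join_append (pvSp_ne_nil w) q r, join_pvSp] at this
      rw [← this]
      simp

def consHead (p : List Char) : List (List Char) → List (List Char)
  | [] => [p]
  | t :: ts => (p ++ t) :: ts

theorem go_spec : ∀ (fuel : Nat) (l cur : List Char) (acc : List (List Char)), l.length ≤ fuel →
    PySem.Chars.splitOn.go ['_'] fuel l cur acc = acc.reverse ++ consHead cur.reverse (pvSp l) := by
  intro fuel
  induction fuel with
  | zero =>
    intro l cur acc h
    have : l = [] := List.length_eq_zero_iff.mp (Nat.le_zero.mp h)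
    subst this
    simp [PySem.Chars.splitOn.go, pvSp, consHead]
  | succ f ih =>
    intro l cur acc h
    cases l with
    | nil => simp [PySem.Chars.splitOn.go, pvSp, consHead]
    | cons c rest =>
      by_cases hc : c = '_'
      · subst hc
        rw [PySem.Chars.splitOn.go]
        have hpre : List.isPrefixOf ['_'] ('_' :: rest) = true := by simp [List.isPrefixOf]
        rw [if_pos hpre]
        simp only [List.length_cons] at h
        rw [ih _ _ _ (by simpa using h)]
        simp only [pvSp]
        cases hr : pvSp rest with
        | nil => exact absurd hr (pvSp_ne_nil rest)
        | cons t ts => simp [consHead, hr]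
      · rw [PySem.Chars.splitOn.go]
        have hpre : List.isPrefixOf ['_'] (c :: rest) = false := by
          simp [List.isPrefixOf]
          intro h'; exact absurd h'.symm hc
        rw [if_neg (by simp [hpre])]
        simp only [List.length_cons] at h
        rw [ih _ _ _ (by omega)]
        simp only [pvSp, if_neg hc]
        cases hr : pvSp rest with
        | nil => exact absurd hr (pvSp_ne_nil rest)
        | cons t ts => simp [consHead]

theorem splitOn_eq_pvSp (l : List Char) : PySem.Chars.splitOn l ['_'] = pvSp l := by
  rw [PySem.Chars.splitOn, go_spec (l.length + 1) l [] [] (by omega)]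
  cases hr : pvSp l with
  | nil => exact absurd hr (pvSp_ne_nil l)
  | cons t ts => simp [consHead]

theorem goM0 (fuel : Nat) (l cur : List Char) (acc : List (List Char)) :
    PySem.Chars.splitOnMax.go ['_'] fuel 0 l cur acc = ((cur.reverse ++ l) :: acc).reverse := by
  cases fuel with
  | zero => rw [PySem.Chars.splitOnMax.go]
  | succ f =>
    cases l with
    | nil => rw [PySem.Chars.splitOnMax.go] <;> simp
    | cons c rest => rw [PySem.Chars.splitOnMax.go]; simp

theorem goM1 : ∀ (fuel : Nat) (l cur : List Char) (acc : List (List Char)), l.length ≤ fuel →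
    PySem.Chars.splitOnMax.go ['_'] fuel 1 l cur acc =
      acc.reverse ++ (match pvSp l with
        | [] => []
        | [t] => [cur.reverse ++ t]
        | t :: ts => [cur.reverse ++ t, PySem.Chars.join ['_'] ts]) := by
  intro fuel
  induction fuel with
  | zero =>
    intro l cur acc h
    have : l = [] := List.length_eq_zero_iff.mp (Nat.le_zero.mp h)
    subst this
    rw [PySem.Chars.splitOnMax.go]
    simp [pvSp]
  | succ f ih =>
    intro l cur acc h
    cases l with
    | nil => rw [PySem.Chars.splitOnMax.go] <;> simp [pvSp]
    | cons c rest =>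
      by_cases hc : c = '_'
      · subst hc
        rw [PySem.Chars.splitOnMax.go]
        have hpre : List.isPrefixOf ['_'] ('_' :: rest) = true := by simp [List.isPrefixOf]
        rw [if_neg (by omega), if_pos hpre]
        simp only [List.length_singleton, List.drop_one, List.tail_cons]
        rw [goM0]
        simp only [pvSp]
        cases hr : pvSp rest with
        | nil => exact absurd hr (pvSp_ne_nil rest)
        | cons t ts =>
          have hj := join_pvSp rest
          rw [hr] at hj
          simp [hj]
      · rw [PySem.Chars.splitOnMax.go]
        have hpre : List.isPrefixOf ['_'] (c :: rest) = false := by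
          simp [List.isPrefixOf]
          intro h'; exact absurd h'.symm hc
        rw [if_neg (by omega), if_neg (by simp [hpre])]
        simp only [List.length_cons] at h
        rw [ih _ _ _ (by omega)]
        simp only [pvSp, if_neg hc]
        cases hr : pvSp rest with
        | nil => exact absurd hr (pvSp_ne_nil rest)
        | cons t ts =>
          cases ts with
          | nil => simp
          | cons q ts' => simp

theorem splitOnMax_one (l : List Char) :
    PySem.Chars.splitOnMax l ['_'] 1 =
      match pvSp l with
      | [] => []
      | [t] => [t]
      | t :: ts => [t, PySem.Chars.join ['_'] ts] := by
  rw [PySem.Chars.splitOnMax, if_neg (by omega)]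
  simp only [Int.toNat_one]
  rw [goM1 (l.length + 1) l [] [] (by omega)]
  cases hr : pvSp l with
  | nil => exact absurd hr (pvSp_ne_nil l)
  | cons t ts => cases ts <;> simp

theorem slice_eval (cl : String) (w rest : List Char) (h : cl.toList = w ++ '_' :: rest) :
    PySem.Str.slice cl (some (PySem.Str.len (String.ofList w ++ "_"))) none = String.ofList rest := by
  simp only [PySem.Str.slice, PySem.Chars.slice_eq_listSlice, PySem.Str.len]
  rw [PySem.List.slice_from (xs := cl.toList) (Int.natCast_nonneg _)]
  rw [h, show w ++ '_' :: rest = (w ++ ['_']) ++ rest by simp]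
  rw [show ((String.ofList w ++ "_").toList.length : Int).toNat = (w ++ ['_']).length by simp]
  rw [List.drop_left]

theorem startswith_iff' (cl w : String) :
    PySem.Str.startswith cl (w ++ "_") = true ↔ (w.toList ++ ['_']) <+: cl.toList := by
  rw [← PySem.Chars.startswith_iff]
  simp [pysem]

theorem mem_keys_get? (s : String) :
    ((PySem.Dict.get? pvSections s).isSome = true) ↔ s ∈ pvKeys := by
  constructor
  · intro h
    simp only [pvSections, PySem.Dict.get?, Option.isSome_map, List.find?_isSome] at h
    obtain ⟨x, hx, hpx⟩ := h
    have hxs : x.1 = s := by simpa using hpx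
    subst hxs
    fin_cases hx <;> decide
  · intro hs
    fin_cases hs <;> decide

theorem key_not_prefix : ∀ u ∈ pvKeys, ∀ w ∈ pvKeys, u ≠ w →
    ¬ (pvSp u.toList <+: pvSp w.toList) := by
  decide

theorem keys_unique {u w : String} (hu : u ∈ pvKeys) (hw : w ∈ pvKeys)
    {tks : List (List Char)} (h1 : pvSp u.toList <+: tks) (h2 : pvSp w.toList <+: tks) : u = w := by
  by_contra hne
  rcases List.prefix_or_prefix_of_prefix h1 h2 with h | h
  · exact key_not_prefix u hu w hw hne h
  · exact key_not_prefix w hw u hu (Ne.symm hne) h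

theorem keys_eq : PySem.Dict.keys pvSections = pvKeys := by decide

theorem not_exact_of_proper {cl : String} {w : String} (hw : w ∈ pvKeys)
    {q : List Char} {r : List (List Char)} (h : pvSp cl.toList = pvSp w.toList ++ q :: r) :
    (PySem.Dict.get? pvSections cl).isSome = false := by
  by_contra hc
  have hmem : cl ∈ pvKeys := mem_keys_get? cl |>.mp (by
      cases hb : (PySem.Dict.get? pvSections cl).isSome
      · exact absurd hb hc
      · rfl)
  have h1 : pvSp cl.toList <+: pvSp cl.toList := List.prefix_refl _
  have h2 : pvSp w.toList <+: pvSp cl.toList := ⟨q :: r, h.symm⟩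
  have := keys_unique hmem hw h1 h2
  subst this
  have := congrArg List.length h
  simp at this

theorem cl_decomp {cl w : String} {q : List Char} {r : List (List Char)}
    (h : pvSp cl.toList = pvSp w.toList ++ q :: r) :
    cl.toList = w.toList ++ '_' :: PySem.Chars.join ['_'] (q :: r) := by
  have := join_pvSp cl.toList
  rw [h, join_append (pvSp_ne_nil w.toList) q r, join_pvSp] at this
  exact this.symm

theorem match_unique {cl w : String} (hw : w ∈ pvKeys)
    {q : List Char} {r : List (List Char)} (h : pvSp cl.toList = pvSp w.toList ++ q :: r) :
    ∀ u ∈ pvKeys, PySem.Str.startswith cl (u ++ "_") = true → u = w := by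
  intro u hu hsu
  obtain ⟨ts, hts, hne⟩ := (prefix_iff u.toList cl.toList).mp ((startswith_iff' cl u).mp hsu)
  exact keys_unique hu hw ⟨ts, hts.symm⟩ ⟨q :: r, h.symm⟩

theorem loopA_match {cl w : String}
    (hsw : PySem.Str.startswith cl (w ++ "_") = true) :
    ∀ ks : List String, w ∈ ks → (∀ u ∈ ks, PySem.Str.startswith cl (u ++ "_") = true → u = w) →
      pvLoopA cl ks = (w, some (PySem.Str.slice cl (some (PySem.Str.len (w ++ "_"))) none)) := by
  intro ks
  induction ks with
  | nil => intro h; simp at h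
  | cons u ks' ih =>
    intro hmem hall
    by_cases hu : PySem.Str.startswith cl (u ++ "_") = true
    · have : u = w := hall u List.mem_cons_self hu
      subst this
      simp only [pvLoopA]
      rw [if_pos hu]
    · have hne : u ≠ w := fun h => hu (h ▸ hsw)
      simp only [pvLoopA, Bool.not_eq_true] at hu ⊢
      rw [hu]
      simp only [Bool.false_eq_true, if_false]
      exact ih (by rcases List.mem_cons.mp hmem with h | h; exact absurd h.symm hne; exact h)
        (fun v hv => hall v (List.mem_cons_of_mem _ hv))

theorem loopA_none {cl : String} :
    ∀ ks : List String, (∀ u ∈ ks, ¬ PySem.Str.startswith cl (u ++ "_") = true) →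
      pvLoopA cl ks = pvFallbackA cl := by
  intro ks
  induction ks with
  | nil => intro _; rfl
  | cons u ks' ih =>
    intro hall
    have hu := hall u List.mem_cons_self
    simp only [pvLoopA, Bool.not_eq_true] at hu ⊢
    rw [hu]
    simp only [Bool.false_eq_true, if_false]
    exact ih (fun v hv => hall v (List.mem_cons_of_mem _ hv))

theorem A_match {cl : String} {w : String} (hw : w ∈ pvKeys) {q : List Char} {r : List (List Char)}
    (h : pvSp cl.toList = pvSp w.toList ++ q :: r) :
    parse_cluster_name_py cl = (w, some (String.ofList (PySem.Chars.join ['_'] (q :: r)))) := by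
  have hsw : PySem.Str.startswith cl (w ++ "_") = true :=
    (startswith_iff' cl w).mpr ((prefix_iff w.toList cl.toList).mpr ⟨q :: r, h, by simp⟩)
  simp only [parse_cluster_name_py, not_exact_of_proper hw h, Bool.false_eq_true, if_false, keys_eq]
  rw [loopA_match hsw pvKeys hw (match_unique hw h)]
  have hs := slice_eval cl w.toList (PySem.Chars.join ['_'] (q :: r)) (cl_decomp h)
  rw [show String.ofList w.toList = w from String.ofList_toList] at hs
  rw [hs]

theorem A_exact {cl : String} {w : String} (hw : w ∈ pvKeys) (h : pvSp cl.toList = pvSp w.toList) :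
    parse_cluster_name_py cl = (w, none) := by
  have : cl = w := String.toList_inj.mp (pvSp_inj h)
  subst this
  simp only [parse_cluster_name_py, (mem_keys_get? cl).mpr hw, if_true]

theorem A_nomatch {cl : String} (h : ∀ w ∈ pvKeys, ¬ (pvSp w.toList <+: pvSp cl.toList)) :
    parse_cluster_name_py cl =
      (match pvSp cl.toList with
       | [] => (cl, none)
       | [t] => (String.ofList t, none)
       | t :: ts => (String.ofList t, some (String.ofList (PySem.Chars.join ['_'] ts)))) := by
  have hex : (PySem.Dict.get? pvSections cl).isSome = false := by
    by_contra hc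
    have hmem : cl ∈ pvKeys := mem_keys_get? cl |>.mp (by
      cases hb : (PySem.Dict.get? pvSections cl).isSome
      · exact absurd hb hc
      · rfl)
    exact h cl hmem (List.prefix_refl _)
  simp only [parse_cluster_name_py, hex, Bool.false_eq_true, if_false, keys_eq]
  rw [loopA_none pvKeys (fun u hu hsu => h u hu
    (let ⟨ts, hts, hne⟩ := (prefix_iff u.toList cl.toList).mp ((startswith_iff' cl u).mp hsu)
     ⟨ts, hts.symm⟩))]
  simp only [pvFallbackA, PySem.Str.splitMax?, PySem.Chars.splitMax?]
  rw [show ("_" : String).toList = ['_'] by simp]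
  rw [if_neg (by simp)]
  rw [splitOnMax_one]
  cases hr : pvSp cl.toList with
  | nil => exact absurd hr (pvSp_ne_nil _)
  | cons t ts =>
    cases ts with
    | nil => simp
    | cons q ts' => simp

theorem tokens_eq (cl : String) :
    (PySem.Str.split? cl "_").getD [] = (pvSp cl.toList).map String.ofList := by
  simp only [PySem.Str.split?, PySem.Chars.split?]
  rw [show ("_" : String).toList = ['_'] by simp]
  rw [if_neg (by simp)]
  simp [splitOn_eq_pvSp]

theorem join_ofList (ts : List (List Char)) :
    PySem.Str.join "_" (ts.map String.ofList) = String.ofList (PySem.Chars.join ['_'] ts) := by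
  apply String.toList_inj.mp
  rw [PySem.Str.toList_join]
  simp [List.map_map, Function.comp_def]

theorem scanB_skip {tokens : List String} {k : Nat} (hk : k ≤ tokens.length)
    (hno : (PySem.Dict.get? pvSections (PySem.Str.join "_" (tokens.take k))).isSome = false) :
    pvScanB tokens k = pvScanB tokens (k + 1) := by
  rw [pvScanB]
  simp only [if_pos hk, hno, Bool.false_eq_true, if_false]

theorem scanB_until {tokens : List String} (m : Nat) (hm : m ≤ tokens.length + 1) :
    ∀ k, k ≤ m →
    (∀ j, k ≤ j → j < m →
      (PySem.Dict.get? pvSections (PySem.Str.join "_" (tokens.take j))).isSome = false) →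
    pvScanB tokens k = pvScanB tokens m := by
  have main : ∀ d k, k + d = m →
      (∀ j, k ≤ j → j < m →
        (PySem.Dict.get? pvSections (PySem.Str.join "_" (tokens.take j))).isSome = false) →
      pvScanB tokens k = pvScanB tokens m := by
    intro d
    induction d with
    | zero => intro k hk _; rw [show k = m by omega]
    | succ d ih =>
      intro k hk hno
      rw [scanB_skip (by omega) (hno k (le_refl k) (by omega))]
      exact ih (k + 1) (by omega) (fun j hj1 hj2 => hno j (by omega) hj2)
  intro k hk hno
  exact main (m - k) k (by omega) hno

-- candidate characterization: a key hit at position j forces the key's tokens to be tks.take j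
theorem cand_key {cl : String} {j : Nat} (hj1 : 1 ≤ j) (_hj2 : j ≤ (pvSp cl.toList).length)
    (hkey : (PySem.Dict.get? pvSections
      (PySem.Str.join "_" (((pvSp cl.toList).map String.ofList).take j))).isSome = true) :
    ∃ u ∈ pvKeys, pvSp u.toList = (pvSp cl.toList).take j := by
  set tks := pvSp cl.toList with htks
  rw [← List.map_take, join_ofList] at hkey
  have hu := (mem_keys_get? _).mp hkey
  refine ⟨_, hu, ?_⟩
  rw [String.toList_ofList]
  apply pvSp_join
  · intro hnil
    rw [List.take_eq_nil_iff] at hnil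
    rcases hnil with h | h
    · omega
    · exact pvSp_ne_nil cl.toList h
  · intro t ht
    exact pvSp_sep_free (List.take_subset j tks ht)

theorem no_hit {cl : String} {j : Nat} (hj1 : 1 ≤ j) (hj2 : j ≤ (pvSp cl.toList).length)
    (hnokey : ∀ u ∈ pvKeys, pvSp u.toList ≠ (pvSp cl.toList).take j) :
    (PySem.Dict.get? pvSections
      (PySem.Str.join "_" (((pvSp cl.toList).map String.ofList).take j))).isSome = false := by
  cases hb : (PySem.Dict.get? pvSections
      (PySem.Str.join "_" (((pvSp cl.toList).map String.ofList).take j))).isSome with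
  | false => rfl
  | true =>
    obtain ⟨u, hu, hut⟩ := cand_key hj1 hj2 hb
    exact absurd hut (hnokey u hu)

theorem B_match {cl : String} {w : String} (hw : w ∈ pvKeys) {q : List Char} {r : List (List Char)}
    (h : pvSp cl.toList = pvSp w.toList ++ q :: r) :
    parse_cluster_name_py_alt cl = (w, some (String.ofList (PySem.Chars.join ['_'] (q :: r)))) := by
  have hmpos : 1 ≤ (pvSp w.toList).length :=
    Nat.one_le_iff_ne_zero.mpr (fun h0 => pvSp_ne_nil w.toList (List.length_eq_zero_iff.mp h0))
  have hlen : (pvSp cl.toList).length = (pvSp w.toList).length + r.length + 1 := by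
    rw [h]; simp only [List.length_append, List.length_cons]; omega
  have hno : ∀ j, 1 ≤ j → j < (pvSp w.toList).length →
      (PySem.Dict.get? pvSections
        (PySem.Str.join "_" (((pvSp cl.toList).map String.ofList).take j))).isSome = false := by
    intro j hj1 hj2
    apply no_hit hj1 (by omega)
    intro u hu hut
    have huw : u = w := keys_unique hu hw (hut ▸ List.take_prefix j (pvSp cl.toList))
      ⟨q :: r, h.symm⟩
    subst huw
    have : (pvSp u.toList).length = j := by rw [hut, List.length_take]; omega
    omega
  have huntil := scanB_until (tokens := (pvSp cl.toList).map String.ofList)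
    ((pvSp w.toList).length) (by simp; omega) 1 (by omega) hno
  have htakem : (pvSp cl.toList).take (pvSp w.toList).length = pvSp w.toList := by
    rw [h]; exact List.take_left
  have hdropm : (pvSp cl.toList).drop (pvSp w.toList).length = q :: r := by
    rw [h]; exact List.drop_left
  have hcand : PySem.Str.join "_" (((pvSp cl.toList).map String.ofList).take (pvSp w.toList).length) = w := by
    rw [← List.map_take, join_ofList, htakem, join_pvSp, String.ofList_toList]
  have hneq : ¬ ((pvSp w.toList).length = ((pvSp cl.toList).map String.ofList).length) := by
    simp only [List.length_map]
    omega
  have hstep : pvScanB ((pvSp cl.toList).map String.ofList) (pvSp w.toList).length =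
      some (w, some (String.ofList (PySem.Chars.join ['_'] (q :: r)))) := by
    rw [pvScanB]
    rw [if_pos (by simp; omega)]
    simp only [hcand, (mem_keys_get? w).mpr hw, if_true]
    rw [if_neg hneq]
    rw [← List.map_drop, hdropm, join_ofList]
  simp only [parse_cluster_name_py_alt, tokens_eq]
  rw [huntil, hstep]

theorem B_exact {cl : String} {w : String} (hw : w ∈ pvKeys) (h : pvSp cl.toList = pvSp w.toList) :
    parse_cluster_name_py_alt cl = (w, none) := by
  have hmpos : 1 ≤ (pvSp w.toList).length :=
    Nat.one_le_iff_ne_zero.mpr (fun h0 => pvSp_ne_nil w.toList (List.length_eq_zero_iff.mp h0))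
  have hlen : (pvSp cl.toList).length = (pvSp w.toList).length := by rw [h]
  have hno : ∀ j, 1 ≤ j → j < (pvSp w.toList).length →
      (PySem.Dict.get? pvSections
        (PySem.Str.join "_" (((pvSp cl.toList).map String.ofList).take j))).isSome = false := by
    intro j hj1 hj2
    apply no_hit hj1 (by omega)
    intro u hu hut
    have huw : u = w := keys_unique hu hw (hut ▸ List.take_prefix j (pvSp cl.toList))
      (h ▸ List.prefix_refl _)
    subst huw
    have : (pvSp u.toList).length = j := by rw [hut, List.length_take]; omega
    omega
  have huntil := scanB_until (tokens := (pvSp cl.toList).map String.ofList)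
    ((pvSp w.toList).length) (by simp; omega) 1 (by omega) hno
  have htakem : (pvSp cl.toList).take (pvSp w.toList).length = pvSp w.toList := by
    rw [h, List.take_length]
  have hcand : PySem.Str.join "_" (((pvSp cl.toList).map String.ofList).take (pvSp w.toList).length) = w := by
    rw [← List.map_take, join_ofList, htakem, join_pvSp, String.ofList_toList]
  have hstep : pvScanB ((pvSp cl.toList).map String.ofList) (pvSp w.toList).length =
      some (w, none) := by
    rw [pvScanB]
    rw [if_pos (by simp; omega)]
    simp only [hcand, (mem_keys_get? w).mpr hw, if_true]
    rw [if_pos (by simp; omega)]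
  simp only [parse_cluster_name_py_alt, tokens_eq]
  rw [huntil, hstep]

theorem B_nomatch {cl : String} (h : ∀ w ∈ pvKeys, ¬ (pvSp w.toList <+: pvSp cl.toList)) :
    parse_cluster_name_py_alt cl =
      (match pvSp cl.toList with
       | [] => (cl, none)
       | [t] => (String.ofList t, none)
       | t :: ts => (String.ofList t, some (String.ofList (PySem.Chars.join ['_'] ts)))) := by
  have hpos : 1 ≤ (pvSp cl.toList).length :=
    Nat.one_le_iff_ne_zero.mpr (fun h0 => pvSp_ne_nil cl.toList (List.length_eq_zero_iff.mp h0))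
  have hno : ∀ j, 1 ≤ j → j < (pvSp cl.toList).length + 1 →
      (PySem.Dict.get? pvSections
        (PySem.Str.join "_" (((pvSp cl.toList).map String.ofList).take j))).isSome = false := by
    intro j hj1 hj2
    apply no_hit hj1 (by omega)
    intro u hu hut
    exact h u hu (hut ▸ List.take_prefix j (pvSp cl.toList))
  have huntil := scanB_until (tokens := (pvSp cl.toList).map String.ofList)
    ((pvSp cl.toList).length + 1) (by simp) 1 (by omega) hno
  have hend : pvScanB ((pvSp cl.toList).map String.ofList) ((pvSp cl.toList).length + 1) = none := by
    rw [pvScanB]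
    rw [if_neg (by simp)]
  simp only [parse_cluster_name_py_alt, tokens_eq]
  rw [huntil, hend]
  cases htk : pvSp cl.toList with
  | nil => exact absurd htk (pvSp_ne_nil cl.toList)
  | cons t ts =>
    cases ts with
    | nil => simp
    | cons q ts' =>
      have hj := join_ofList (q :: ts')
      simp only [List.map_cons] at hj
      simp [hj]

-- ===== VERDICT (by name: the statement is the Claim_ definition above) =====
theorem parse_cluster_name_py_spec : Claim_equal_parse_cluster_name_py := by
  intro cl _
  unfold Spec_parse_cluster_name_py
  by_cases hex : ∃ w ∈ pvKeys, pvSp w.toList <+: pvSp cl.toList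
  · obtain ⟨w, hw, ts, hts⟩ := hex
    match ts, hts with
    | [], hts => rw [A_exact hw (by rw [← hts, List.append_nil]), B_exact hw (by rw [← hts, List.append_nil])]
    | q :: r, hts => rw [A_match hw hts.symm, B_match hw hts.symm]
  · push Not at hex
    rw [A_nomatch hex, B_nomatch hex]
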